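-- pv_equiv track=rewrite | github.com/t11z/tavern | backend/tavern/discord_bot/cogs/character.py | _parse_standard_array
-- ===== SOURCE A (Python) =====
-- _STANDARD_ARRAY = [15, 14, 13, 12, 10, 8]
--
-- _ABILITIES = ["STR", "DEX", "CON", "INT", "WIS", "CHA"]
--
-- def _parse_standard_array(text: str) -> dict[str, int] | None:
--     """Parse '15 14 13 12 10 8' (in STR DEX CON INT WIS CHA order)."""
--     parts = text.split()
--     if len(parts) != 6:
--         return None
--     try:
--         values = [int(p) for p in parts]
--     except ValueError:
--         return None
--     if sorted(values, reverse=True) != _STANDARD_ARRAY: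
--         return None
--     return dict(zip(_ABILITIES, values))
-- ===== SOURCE B (Python) =====
-- _STANDARD_ARRAY = [15, 14, 13, 12, 10, 8]
--
-- _ABILITIES = ["STR", "DEX", "CON", "INT", "WIS", "CHA"]
--
-- def _parse_standard_array(text: str):
--     """Parse '15 14 13 12 10 8' (in STR DEX CON INT WIS CHA order)."""
--     parts = text.split()
--     if len(parts) != 6:
--         return None
--     try:
--         values = [int(p) for p in parts]
--     except ValueError:
--         return None
--     # Validate by consuming each value from the remaining pool of required
--     # scores while building the result dict in a single pass (no sorting).
--     remaining = list(_STANDARD_ARRAY)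
--     result = {}
--     for name, v in zip(_ABILITIES, values):
--         if v not in remaining:
--             return None
--         remaining.remove(v)
--         result[name] = v
--     return result
-- ===== Notes on version B (the rewrite author's own statement) =====
-- stated objective: alternative
-- what changed: Replaces the sort-and-compare multiset check plus dict(zip(...)) with a single pass that consumes each parsed value from a remaining pool of required scores while building the result dict incrementally.
import Mathlib
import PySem

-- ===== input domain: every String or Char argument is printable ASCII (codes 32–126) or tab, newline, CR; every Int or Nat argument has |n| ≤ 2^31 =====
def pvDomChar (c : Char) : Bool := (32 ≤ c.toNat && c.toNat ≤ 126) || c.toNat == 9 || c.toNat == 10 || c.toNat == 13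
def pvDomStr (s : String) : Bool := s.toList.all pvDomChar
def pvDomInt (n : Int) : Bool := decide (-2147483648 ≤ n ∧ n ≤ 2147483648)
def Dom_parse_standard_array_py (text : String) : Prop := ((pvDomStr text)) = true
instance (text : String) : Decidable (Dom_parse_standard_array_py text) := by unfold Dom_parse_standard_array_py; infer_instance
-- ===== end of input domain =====

-- B replaces A's sort-and-compare validation plus dict(zip(...)) by one pass that
-- consumes each value from a pool of required scores while building the dict (objective: alternative).

def pvStdArray : List Int := [15, 14, 13, 12, 10, 8]

def pvAbilities : List String := ["STR", "DEX", "CON", "INT", "WIS", "CHA"]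

-- ===== PORT A =====
def parse_standard_array_py (text : String) : Option (List (String × Int)) :=
  let parts := PySem.Str.split₀ text
  if parts.length ≠ 6 then none
  else
    match parts.mapM PySem.Int.ofStr? with
    | none => none
    | some values =>
      if PySem.List.sorted values (fun x => x) true ≠ pvStdArray then none
      else some (PySem.Dict.ofList (pvAbilities.zip values)).items

-- ===== PORT B =====
-- the for-loop over zip(_ABILITIES, values): consume v from remaining, insert into result
def pvFill : List (String × Int) → List Int → PySem.Dict String Int → Option (PySem.Dict String Int)
  | [], _, acc => some acc
  | (name, v) :: rest, remaining, acc =>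
      match PySem.List.remove? remaining v with
      | none => none                                  -- 'if v not in remaining: return None'
      | some remaining' => pvFill rest remaining' (acc.insert name v)

def parse_standard_array_py_alt (text : String) : Option (List (String × Int)) :=
  let parts := PySem.Str.split₀ text
  if parts.length ≠ 6 then none
  else
    match parts.mapM PySem.Int.ofStr? with
    | none => none
    | some values =>
      (pvFill (pvAbilities.zip values) pvStdArray PySem.Dict.empty).map PySem.Dict.items

-- ===== PRECONDITION & SPEC =====
def Spec_parse_standard_array_py (text : String) (out : Option (List (String × Int))) : Prop := out = parse_standard_array_py_alt text
instance (text : String) (out : Option (List (String × Int))) : Decidable (Spec_parse_standard_array_py text out) := by unfold Spec_parse_standard_array_py; infer_instance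

-- ===== CLAIM (what is proved, stated in full; the proofs are below) =====
def Claim_equal_parse_standard_array_py : Prop := ∀ (text : String), Dom_parse_standard_array_py text → Spec_parse_standard_array_py text (parse_standard_array_py text)

-- ===== LEMMAS AND PROOFS =====

theorem pv_mapM_length {α β : Type} (xs : List α) (f : α → Option β) (vs : List β)
    (h : xs.mapM f = some vs) : vs.length = xs.length := by
  induction xs generalizing vs with
  | nil => simp_all
  | cons x t ih =>
    rw [List.mapM_cons] at h
    cases hf : f x with
    | none => simp [hf] at h
    | some v =>
      simp only [hf, Option.pure_def, Option.bind_eq_bind, Option.bind_some] at h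
      cases ht : t.mapM f with
      | none => simp [ht] at h
      | some vs' =>
        simp [ht] at h
        subst h
        simp [ih _ ht]

-- success of the consuming loop forces the values to fit into the remaining pool (as a multiset)
theorem pvFill_some_le (nvs : List (String × Int)) :
    ∀ (remaining : List Int) (acc : PySem.Dict String Int) (out : PySem.Dict String Int),
    pvFill nvs remaining acc = some out →
    (nvs.map Prod.snd).Subperm remaining := by
  induction nvs with
  | nil => intro remaining acc out _; simp
  | cons nv rest ih =>
    intro remaining acc out h
    obtain ⟨name, v⟩ := nv
    cases hr : PySem.List.remove? remaining v with
    | none => simp [pvFill, hr] at h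
    | some remaining' =>
      simp only [pvFill, hr] at h
      have hmem : v ∈ remaining := by
        by_contra hv
        rw [(PySem.List.remove?_eq_none_iff remaining v).2 hv] at hr
        simp at hr
      have herase : remaining' = remaining.erase v := by
        have := PySem.List.remove?_eq_some_erase remaining v hmem
        rw [this] at hr
        exact (Option.some.inj hr).symm
      have hle := ih remaining' (acc.insert name v) out h
      rw [herase, List.subperm_iff_count] at hle
      rw [List.subperm_iff_count]
      intro x
      have hc := hle x
      rw [List.count_erase] at hc
      have hpos : 0 < remaining.count v := List.count_pos_iff.2 hmem
      simp only [List.map_cons, List.count_cons]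
      by_cases hx : x = v
      · subst hx; simp at hc ⊢; omega
      · have : (v == x) = false := by simp [Ne.symm hx]
        simp [this] at hc ⊢; omega

-- if the values fit into the remaining pool, the loop succeeds and returns the insert-fold
theorem pvFill_of_le (nvs : List (String × Int)) :
    ∀ (remaining : List Int) (acc : PySem.Dict String Int),
    (nvs.map Prod.snd).Subperm remaining →
    pvFill nvs remaining acc = some (nvs.foldl (fun d p => d.insert p.1 p.2) acc) := by
  induction nvs with
  | nil => intro remaining acc _; simp [pvFill]
  | cons nv rest ih =>
    intro remaining acc hle
    obtain ⟨name, v⟩ := nv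
    rw [List.subperm_iff_count] at hle
    have hcv := hle v
    simp only [List.map_cons, List.count_cons_self] at hcv
    have hmem : v ∈ remaining := List.count_pos_iff.1 (by omega)
    have hrest : (rest.map Prod.snd).Subperm (remaining.erase v) := by
      rw [List.subperm_iff_count]
      intro x
      have hc := hle x
      rw [List.count_erase]
      simp only [List.map_cons, List.count_cons] at hc
      by_cases hx : x = v
      · subst hx; simp at hc ⊢; omega
      · have : (v == x) = false := by simp [Ne.symm hx]
        simp [this] at hc ⊢; omega
    simp only [pvFill, PySem.List.remove?_eq_some_erase remaining v hmem]
    rw [ih _ _ hrest]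
    rfl

-- A's check and B's loop success are the same condition: values is a permutation of the standard array
theorem pv_core (values : List Int) (hlen : values.length = 6) :
    (if PySem.List.sorted values (fun x => x) true ≠ pvStdArray then none
     else some (PySem.Dict.ofList (pvAbilities.zip values)).items)
    = (pvFill (pvAbilities.zip values) pvStdArray PySem.Dict.empty).map PySem.Dict.items := by
  have hmapsnd : (pvAbilities.zip values).map Prod.snd = values := by
    apply List.map_snd_zip
    simp [pvAbilities, hlen]
  by_cases hperm : values.Perm pvStdArray
  · have hsorted : PySem.List.sorted values (fun x => x) true = pvStdArray := by
      apply PySem.List.sorted_rev_eq_of_perm_of_pairwise_gt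
      · exact hperm.symm
      · decide
    have hle : ((pvAbilities.zip values).map Prod.snd).Subperm pvStdArray := by
      rw [hmapsnd]; exact hperm.subperm
    rw [pvFill_of_le _ _ _ hle]
    simp only [hsorted, ne_eq, not_true_eq_false, if_false]
    rfl
  · have hne : PySem.List.sorted values (fun x => x) true ≠ pvStdArray := by
      intro hs
      exact hperm (((PySem.List.sorted_perm values (fun x => x) true).symm).trans (hs ▸ List.Perm.refl _))
    rw [if_pos hne]
    cases hB : pvFill (pvAbilities.zip values) pvStdArray PySem.Dict.empty with
    | none => rfl
    | some out =>
      exfalso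
      have hle := pvFill_some_le _ _ _ _ hB
      rw [hmapsnd] at hle
      have hlen2 : pvStdArray.length ≤ values.length := by simp [pvStdArray, hlen]
      exact hperm (hle.perm_of_length_le hlen2)

-- ===== VERDICT (by name: the statement is the Claim_ definition above) =====
theorem parse_standard_array_py_spec : Claim_equal_parse_standard_array_py := by
  intro text _
  unfold Spec_parse_standard_array_py parse_standard_array_py parse_standard_array_py_alt
  set parts := PySem.Str.split₀ text with hp
  by_cases hlen : parts.length ≠ 6
  · simp [hlen]
  · simp only [hlen, if_false]
    cases hm : parts.mapM PySem.Int.ofStr? with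
    | none => rfl
    | some values =>
      have hvlen : values.length = 6 := by
        rw [pv_mapM_length parts _ _ hm]
        omega
      exact pv_core values hvlen
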